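-- pv_equiv track=rewrite | github.com/jsoyer/cv-pipeline | scripts/references.py | _find_ref
-- ===== SOURCE A (Python) =====
-- def _find_ref(refs: list, name: str) -> dict | None:
--     name_l = name.lower()
--     for r in refs:
--         if r.get("name", "").lower() == name_l:
--             return r
--     # partial match
--     for r in refs:
--         if name_l in r.get("name", "").lower():
--             return r
--     return None
-- ===== SOURCE B (Python) =====
-- def _find_ref(refs: list, name: str) -> dict | None:
--     name_l = name.lower()
--     partial = None
--     for r in refs:
--         rn = r.get("name", "").lower()
--         if rn == name_l:
--             return r
--         if partial is None and name_l in rn: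
--             partial = r
--     return partial
-- ===== Notes on version B (the rewrite author's own statement) =====
-- stated objective: alternative
-- what changed: A's two sequential scans (exact match, then partial match) are merged into a single pass that lowercases each name once, returns early on an exact match, and remembers the first partial-match candidate in an accumulator returned after the loop.
import Mathlib
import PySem

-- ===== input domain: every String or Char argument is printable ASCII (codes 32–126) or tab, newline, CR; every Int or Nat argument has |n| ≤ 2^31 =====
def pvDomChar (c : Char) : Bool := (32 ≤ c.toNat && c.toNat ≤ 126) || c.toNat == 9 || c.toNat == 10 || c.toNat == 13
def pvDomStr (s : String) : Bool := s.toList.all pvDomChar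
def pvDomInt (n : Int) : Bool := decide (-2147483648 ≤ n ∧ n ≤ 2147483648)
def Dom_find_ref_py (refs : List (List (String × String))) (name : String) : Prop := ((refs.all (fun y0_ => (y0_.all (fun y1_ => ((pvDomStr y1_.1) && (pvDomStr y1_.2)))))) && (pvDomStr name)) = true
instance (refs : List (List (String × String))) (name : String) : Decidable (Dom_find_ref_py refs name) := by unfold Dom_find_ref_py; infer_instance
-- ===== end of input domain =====

-- B merges A's two scans (exact, then partial) into one pass keeping the first partial candidate; alternative decomposition, same cost.


-- ===== PORT A =====
-- first loop of A: return the first r whose lowercased name equals name_l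
def pvFindExact (name_l : String) (refs : List (List (String × String))) : Option (List (String × String)) :=
  match refs with
  | [] => none
  | r :: rest =>
    if PySem.Str.lower (PySem.Dict.getD (PySem.Dict.mk r) "name" "") = name_l then some r
    else pvFindExact name_l rest

-- second loop of A: return the first r whose lowercased name contains name_l
def pvFindPartial (name_l : String) (refs : List (List (String × String))) : Option (List (String × String)) :=
  match refs with
  | [] => none
  | r :: rest =>
    if PySem.Str.isIn name_l (PySem.Str.lower (PySem.Dict.getD (PySem.Dict.mk r) "name" "")) then some r
    else pvFindPartial name_l rest

def find_ref_py (refs : List (List (String × String))) (name : String) : Option (List (String × String)) :=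
  let name_l := PySem.Str.lower name
  match pvFindExact name_l refs with
  | some r => some r
  | none => pvFindPartial name_l refs

-- ===== PORT B =====
-- single pass: early return on exact match, remember first partial candidate in `partial?`
def pvFindLoop (name_l : String) (refs : List (List (String × String)))
    (partial? : Option (List (String × String))) : Option (List (String × String)) :=
  match refs with
  | [] => partial?
  | r :: rest =>
    let rn := PySem.Str.lower (PySem.Dict.getD (PySem.Dict.mk r) "name" "")
    if rn = name_l then some r
    else pvFindLoop name_l rest
      (if partial?.isNone && PySem.Str.isIn name_l rn then some r else partial?)

def find_ref_py_alt (refs : List (List (String × String))) (name : String) : Option (List (String × String)) :=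
  pvFindLoop (PySem.Str.lower name) refs none

-- ===== PRECONDITION & SPEC =====
def Spec_find_ref_py (refs : List (List (String × String))) (name : String) (out : Option (List (String × String))) : Prop := out = find_ref_py_alt refs name
instance (refs : List (List (String × String))) (name : String) (out : Option (List (String × String))) : Decidable (Spec_find_ref_py refs name out) := by unfold Spec_find_ref_py; infer_instance

-- ===== CLAIM (what is proved, stated in full; the proofs are below) =====
def Claim_equal_find_ref_py : Prop := ∀ (refs : List (List (String × String))) (name : String), Dom_find_ref_py refs name → Spec_find_ref_py refs name (find_ref_py refs name)

-- ===== LEMMAS AND PROOFS =====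
theorem pvFindLoop_eq (name_l : String) (refs : List (List (String × String)))
    (acc : Option (List (String × String))) :
    pvFindLoop name_l refs acc =
      (match pvFindExact name_l refs with
       | some r => some r
       | none => acc.or (pvFindPartial name_l refs)) := by
  induction refs generalizing acc with
  | nil => cases acc <;> simp [pvFindLoop, pvFindExact, pvFindPartial]
  | cons r rest ih =>
    simp only [pvFindLoop, pvFindExact, pvFindPartial]
    split
    · rfl
    · rw [ih]
      cases pvFindExact name_l rest <;> cases acc <;> simp [Option.or]
      by_cases hc : PySem.Chars.isIn name_l.toList
          (PySem.Chars.lower (PySem.Dict.getD (PySem.Dict.mk r) "name" "").toList) = true <;>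
        simp [hc]

-- ===== VERDICT (by name: the statement is the Claim_ definition above) =====
theorem find_ref_py_spec : Claim_equal_find_ref_py := by
  intro refs name _
  unfold Spec_find_ref_py find_ref_py find_ref_py_alt
  rw [pvFindLoop_eq]
  cases h : pvFindExact (PySem.Str.lower name) refs <;> simp [h, Option.or]
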